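-- pv_equiv track=rewrite | github.com/zhongli1990/hie | demos/nhs_trust/lib/nhs_validation_process.py | _validate_nhs_number
-- ===== SOURCE A (Python) =====
-- def _validate_nhs_number(nhs_number: str) -> bool:
--     """
--     Validate NHS Number using Modulus 11 check digit algorithm.
--
--     NHS Number format: 10 digits, last digit is check digit
--     Algorithm: https://www.datadictionary.nhs.uk/attributes/nhs_number.html
--     """
--     # Remove spaces and validate format
--     nhs_number = nhs_number.replace(' ', '')
--
--     if not nhs_number.isdigit() or len(nhs_number) != 10:
--         return False
--
--     # Modulus 11 algorithm
--     multipliers = [10, 9, 8, 7, 6, 5, 4, 3, 2]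
--     check_digit = int(nhs_number[9])
--
--     total = sum(int(nhs_number[i]) * multipliers[i] for i in range(9))
--     remainder = total % 11
--     expected_check_digit = 11 - remainder
--
--     # Special cases
--     if expected_check_digit == 11:
--         expected_check_digit = 0
--     elif expected_check_digit == 10:
--         # NHS Numbers with check digit 10 are invalid
--         return False
--
--     return check_digit == expected_check_digit
-- ===== SOURCE B (Python) =====
-- def _validate_nhs_number(nhs_number: str) -> bool:
--     """Single streaming pass: skip spaces, reject non-digits, weight successive
--     digits 10 down to 1; valid iff exactly ten digits were seen and the full
--     weighted sum (check digit included) is divisible by 11."""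
--     total = 0
--     weight = 10
--     for ch in nhs_number:
--         if ch == ' ':
--             continue
--         if not '0' <= ch <= '9':
--             return False
--         if weight == 0:
--             return False
--         total += (ord(ch) - 48) * weight
--         weight -= 1
--     return weight == 0 and total % 11 == 0
-- ===== Notes on version B (the rewrite author's own statement) =====
-- stated objective: alternative
-- what changed: Replaces A's staged passes (space-stripping replace, isdigit+length guard, 9-term multiplier sum, expected-check-digit computation with 11->0 and 10->invalid branches) by a single streaming pass over the raw string that skips spaces, rejects non-digits, weights successive digits 10 down to 1 (check digit included), and accepts iff exactly ten digits were seen and the weighted sum is divisible by 11.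
import Mathlib
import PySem

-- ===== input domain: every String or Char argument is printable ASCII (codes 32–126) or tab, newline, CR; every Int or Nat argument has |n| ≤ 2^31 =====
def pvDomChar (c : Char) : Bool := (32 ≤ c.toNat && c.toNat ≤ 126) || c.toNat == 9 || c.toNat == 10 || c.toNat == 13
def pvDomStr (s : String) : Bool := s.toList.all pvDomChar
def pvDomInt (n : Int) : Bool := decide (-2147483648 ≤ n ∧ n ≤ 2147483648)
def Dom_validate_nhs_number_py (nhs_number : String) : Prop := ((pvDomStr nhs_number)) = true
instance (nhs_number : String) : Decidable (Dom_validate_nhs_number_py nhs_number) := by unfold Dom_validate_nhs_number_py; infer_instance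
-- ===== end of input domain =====

-- B replaces A's staged passes (strip spaces, isdigit+length guard, 9-term sum, check-digit
-- special cases) with one streaming pass over the raw string carrying (weight, total); simpler.

-- ===== PORT A =====
-- int(c) for a single digit character (exact: only reached after the isdigit guard)
def pvDigit (c : Char) : Int := (c.toNat : Int) - 48

def validate_nhs_number_py (nhs_number : String) : Bool :=
  let s := (PySem.Str.replace nhs_number " " "").toList
  if !(PySem.Chars.strIsdigit s) || s.length ≠ 10 then false
  else
    let multipliers : List Int := [10, 9, 8, 7, 6, 5, 4, 3, 2]
    let check_digit : Int := pvDigit (s.getD 9 '0')   -- nhs_number[9]: in range after the guard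
    let total : Int := (List.range 9).foldl
      (fun acc i => acc + pvDigit (s.getD i '0') * multipliers.getD i 0) 0
    let remainder := PySem.Int.mod total 11
    let expected_check_digit := 11 - remainder
    if expected_check_digit = 11 then check_digit == 0
    else if expected_check_digit = 10 then false
    else check_digit == expected_check_digit

-- ===== PORT B =====
-- the for-loop of Source B as structural recursion over the characters, state = (weight, total)
def nhsScan : List Char → Nat → Int → Bool
  | [], weight, total => weight == 0 && PySem.Int.mod total 11 == 0
  | ch :: rest, weight, total =>
    if ch = ' ' then nhsScan rest weight total
    else if ¬('0' ≤ ch ∧ ch ≤ '9') then false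
    else if weight = 0 then false
    else nhsScan rest (weight - 1) (total + ((ch.toNat : Int) - 48) * (weight : Int))

def validate_nhs_number_py_alt (nhs_number : String) : Bool :=
  nhsScan nhs_number.toList 10 0

-- ===== PRECONDITION & SPEC =====
def Spec_validate_nhs_number_py (nhs_number : String) (out : Bool) : Prop := out = validate_nhs_number_py_alt nhs_number
instance (nhs_number : String) (out : Bool) : Decidable (Spec_validate_nhs_number_py nhs_number out) := by unfold Spec_validate_nhs_number_py; infer_instance

-- ===== CLAIM (what is proved, stated in full; the proofs are below) =====
def Claim_equal_validate_nhs_number_py : Prop := ∀ (nhs_number : String), Dom_validate_nhs_number_py nhs_number → Spec_validate_nhs_number_py nhs_number (validate_nhs_number_py nhs_number)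

-- ===== LEMMAS AND PROOFS =====

-- the weighted sum B accumulates, written as a function of the remaining digits
def nhsWsum : List Char → Nat → Int
  | [], _ => 0
  | c :: cs, w => ((c.toNat : Int) - 48) * (w : Int) + nhsWsum cs (w - 1)

-- replace s ' ' '' is filtering the spaces out
theorem replace_go_space (l acc : List Char) :
    PySem.Chars.replace.go [' '] [] l.length l acc
      = acc.reverse ++ l.filter (fun c => !(c == ' ')) := by
  induction l generalizing acc with
  | nil => simp [PySem.Chars.replace.go]
  | cons c t ih =>
    rw [List.length_cons, PySem.Chars.replace.go]
    by_cases hc : c = ' '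
    · subst hc
      simp only [List.isPrefixOf, BEq.rfl, Bool.true_and, List.isPrefixOf_nil_left, if_true]
      simpa using ih acc
    · have : List.isPrefixOf [' '] (c :: t) = false := by
        simp [List.isPrefixOf]; intro h; exact absurd h.symm hc
      simp only [this, Bool.false_eq_true, if_false]
      rw [ih (c :: acc)]
      simp [hc]
  termination_by l.length

theorem replace_space_eq_filter (s : List Char) :
    PySem.Chars.replace s [' '] [] = s.filter (fun c => !(c == ' ')) := by
  rw [PySem.Chars.replace]
  simpa using replace_go_space s []

-- B skips spaces, so it only sees the filtered characters
theorem nhsScan_filter (l : List Char) (w : Nat) (t : Int) :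
    nhsScan l w t = nhsScan (l.filter (fun c => !(c == ' '))) w t := by
  induction l generalizing w t with
  | nil => rfl
  | cons c cs ih =>
    by_cases hc : c = ' '
    · subst hc; simpa [nhsScan] using ih w t
    · have hf : (c :: cs).filter (fun c => !(c == ' '))
          = c :: cs.filter (fun c => !(c == ' ')) := by simp [hc]
      rw [hf]
      by_cases hd : ¬('0' ≤ c ∧ c ≤ '9')
      · simp [nhsScan, hc, hd]
      · by_cases hw : w = 0 <;> simp [nhsScan, hc, hd, hw, ih]

-- characterisation of B's scan on a space-free list
theorem nhsScan_char (l : List Char) (hsp : ∀ c ∈ l, c ≠ ' ') (w : Nat) (t : Int) :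
    nhsScan l w t
      = ((l.all (fun c => decide ('0' ≤ c) && decide (c ≤ '9')) && (l.length == w))
          && (PySem.Int.mod (t + nhsWsum l w) 11 == 0)) := by
  induction l generalizing w t with
  | nil => cases w <;> simp [nhsScan, nhsWsum]
  | cons c cs ih =>
    have hc : c ≠ ' ' := hsp c (List.mem_cons_self ..)
    have hsp' : ∀ x ∈ cs, x ≠ ' ' := fun x hx => hsp x (List.mem_cons_of_mem _ hx)
    simp only [nhsScan, hc, if_false, nhsWsum]
    by_cases hd : '0' ≤ c ∧ c ≤ '9'
    · simp only [hd, if_false]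
      by_cases hw : w = 0
      · subst hw
        simp [hd.1, hd.2, List.length_cons]
      · simp only [hw, if_false, ih hsp' (w - 1)]
        have hlen : (cs.length == w - 1) = (cs.length + 1 == w) := by
          rcases Nat.exists_eq_succ_of_ne_zero hw with ⟨k, rfl⟩
          simp
        simp [hd.1, hd.2, hlen, add_assoc]
    · simp only [hd, not_false_iff, if_true]
      have : (decide ('0' ≤ c) && decide (c ≤ '9')) = false := by
        rcases not_and_or.mp hd with h | h <;> simp [h]
      simp [List.all_cons, this]

-- the modulus-11 arithmetic core: A's expected-check-digit comparison equals
-- B's divisibility test, for a check digit in 0..9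
theorem pv_mod11_core (d0 d1 d2 d3 d4 d5 d6 d7 d8 d9 : Int)
    (h9 : 0 ≤ d9 ∧ d9 ≤ 9) :
    (if 11 - PySem.Int.mod (d0*10 + d1*9 + d2*8 + d3*7 + d4*6 + d5*5 + d6*4 + d7*3 + d8*2) 11 = 11
       then d9 == 0
     else if 11 - PySem.Int.mod (d0*10 + d1*9 + d2*8 + d3*7 + d4*6 + d5*5 + d6*4 + d7*3 + d8*2) 11 = 10
       then false
     else d9 == 11 - PySem.Int.mod (d0*10 + d1*9 + d2*8 + d3*7 + d4*6 + d5*5 + d6*4 + d7*3 + d8*2) 11)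
    = (PySem.Int.mod (d0*10 + d1*9 + d2*8 + d3*7 + d4*6 + d5*5 + d6*4 + d7*3 + d8*2 + d9*1) 11 == 0) := by
  rw [PySem.Int.mod_eq_emod_of_pos (by norm_num), PySem.Int.mod_eq_emod_of_pos (by norm_num)]
  rw [Bool.eq_iff_iff]
  split_ifs with h1 h2 <;> simp only [beq_iff_eq, false_iff] <;> omega

theorem validate_nhs_number_py_eq_alt (nhs_number : String) :
    validate_nhs_number_py nhs_number = validate_nhs_number_py_alt nhs_number := by
  unfold validate_nhs_number_py validate_nhs_number_py_alt
  rw [nhsScan_filter]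
  have hrepl : (PySem.Str.replace nhs_number " " "").toList
      = nhs_number.toList.filter (fun c => !(c == ' ')) := by
    rw [PySem.Str.toList_replace]
    simpa using replace_space_eq_filter nhs_number.toList
  rw [hrepl]
  obtain ⟨t, ht⟩ : ∃ t, nhs_number.toList.filter (fun c => !(c == ' ')) = t := ⟨_, rfl⟩
  rw [ht]
  have hsp : ∀ c ∈ t, c ≠ ' ' := by
    intro c hc
    rw [← ht] at hc
    simpa using (List.of_mem_filter hc)
  rw [nhsScan_char t hsp 10 0]
  by_cases hg : (!(PySem.Chars.strIsdigit t) || t.length ≠ 10) = true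
  · simp only [hg, if_true]
    rcases Bool.or_eq_true_iff.mp hg with h | h
    · -- some char is not a digit (or t empty: then length ≠ 10 anyway)
      rw [Bool.not_eq_eq_eq_not, Bool.not_true] at h
      unfold PySem.Chars.strIsdigit at h
      rcases Bool.and_eq_false_iff.mp h with h' | h'
      · have ht0 : t = [] := List.isEmpty_iff.mp (by simpa using h')
        simp [ht0]
      · have h'' : t.all (fun c => decide ('0' ≤ c) && decide (c ≤ '9')) = false := h'
        simp [h'']
    · have : (t.length == 10) = false := by simpa using of_decide_eq_true h
      simp [this]
  · simp only [hg]
    simp only [Bool.or_eq_true, Bool.not_eq_eq_eq_not, Bool.not_true, decide_eq_true_eq,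
      not_or, Bool.not_eq_false, Decidable.not_not] at hg
    obtain ⟨hd, hl⟩ := hg
    clear ht hsp hrepl
    rcases t with _|⟨c0,t⟩ <;> try simp at hl
    rcases t with _|⟨c1,t⟩ <;> try simp at hl
    rcases t with _|⟨c2,t⟩ <;> try simp at hl
    rcases t with _|⟨c3,t⟩ <;> try simp at hl
    rcases t with _|⟨c4,t⟩ <;> try simp at hl
    rcases t with _|⟨c5,t⟩ <;> try simp at hl
    rcases t with _|⟨c6,t⟩ <;> try simp at hl
    rcases t with _|⟨c7,t⟩ <;> try simp at hl
    rcases t with _|⟨c8,t⟩ <;> try simp at hl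
    rcases t with _|⟨c9,t⟩ <;> try simp at hl
    rcases t with _|⟨c10,t⟩ <;> try simp at hl
    simp only [PySem.Chars.strIsdigit, List.isEmpty_cons, Bool.not_false, Bool.true_and,
      List.all_cons, List.all_nil, Bool.and_true, Bool.and_eq_true,
      PySem.Chars.isdigit, decide_eq_true_eq] at hd
    have h9 : 0 ≤ pvDigit c9 ∧ pvDigit c9 ≤ 9 := by
      have := hd.2.2.2.2.2.2.2.2.2
      unfold pvDigit
      rcases this with ⟨h1, h2⟩
      have b1 : 48 ≤ c9.toNat := h1
      have b2 : c9.toNat ≤ 57 := h2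
      omega
    have core := pv_mod11_core (pvDigit c0) (pvDigit c1) (pvDigit c2) (pvDigit c3) (pvDigit c4)
      (pvDigit c5) (pvDigit c6) (pvDigit c7) (pvDigit c8) (pvDigit c9) h9
    have hall : ([c0,c1,c2,c3,c4,c5,c6,c7,c8,c9].all
        (fun c => decide ('0' ≤ c) && decide (c ≤ '9'))) = true := by
      simp only [List.all_cons, List.all_nil, Bool.and_eq_true, decide_eq_true_eq, and_true]
      exact ⟨hd.1, hd.2.1, hd.2.2.1, hd.2.2.2.1, hd.2.2.2.2.1, hd.2.2.2.2.2.1,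
        hd.2.2.2.2.2.2.1, hd.2.2.2.2.2.2.2.1, hd.2.2.2.2.2.2.2.2.1, hd.2.2.2.2.2.2.2.2.2⟩
    simp only [hall, List.length_cons, List.length_nil, Nat.reduceAdd, beq_self_eq_true,
      Bool.and_self, Bool.true_and]
    simp only [List.range_succ, List.getD, nhsWsum, pvDigit] at core ⊢
    simpa [add_assoc, zero_add] using core

-- ===== VERDICT (by name: the statement is the Claim_ definition above) =====
theorem validate_nhs_number_py_spec : Claim_equal_validate_nhs_number_py := by
  intro s _
  unfold Spec_validate_nhs_number_py
  exact validate_nhs_number_py_eq_alt s
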